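-- pv_equiv track=rewrite | github.com/agilasoft/logistics | logistics/www/transport_job_detail.py | get_job_status_from_legs
-- ===== SOURCE A (Python) =====
-- def get_job_status_from_legs(legs):
--     """Determine job status based on legs status"""
--     if not legs:
--         return "Draft"
--
--     # Check if any leg is started
--     started_legs = [leg for leg in legs if leg.get('status') == 'Started']
--     if started_legs:
--         return "In Progress"
--
--     # Check if all legs are completed
--     completed_legs = [leg for leg in legs if leg.get('status') == 'Completed']
--     if len(completed_legs) == len(legs):
--         return "Completed"
--
--     # Check if any leg is planned
--     planned_legs = [leg for leg in legs if leg.get('status') == 'Planned']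
--     if planned_legs:
--         return "Planned"
--
--     # Default status
--     return "Draft"
-- ===== SOURCE B (Python) =====
-- def get_job_status_from_legs(legs):
--     """Determine job status based on legs status (single pass over legs)."""
--     if not legs:
--         return "Draft"
--     any_started = False
--     all_completed = True
--     any_planned = False
--     for leg in legs:
--         s = leg.get('status')
--         any_started = any_started or s == 'Started'
--         all_completed = all_completed and s == 'Completed'
--         any_planned = any_planned or s == 'Planned'
--     if any_started:
--         return "In Progress"
--     if all_completed:
--         return "Completed"
--     if any_planned:
--         return "Planned"
--     return "Draft"
-- ===== Notes on version B (the rewrite author's own statement) =====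
-- stated objective: simpler
-- what changed: Replaces A's three separate filtering passes (and intermediate lists) with one fold over the legs that maintains three boolean flags (any started / all completed / any planned), then branches on the flags.
import Mathlib
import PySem

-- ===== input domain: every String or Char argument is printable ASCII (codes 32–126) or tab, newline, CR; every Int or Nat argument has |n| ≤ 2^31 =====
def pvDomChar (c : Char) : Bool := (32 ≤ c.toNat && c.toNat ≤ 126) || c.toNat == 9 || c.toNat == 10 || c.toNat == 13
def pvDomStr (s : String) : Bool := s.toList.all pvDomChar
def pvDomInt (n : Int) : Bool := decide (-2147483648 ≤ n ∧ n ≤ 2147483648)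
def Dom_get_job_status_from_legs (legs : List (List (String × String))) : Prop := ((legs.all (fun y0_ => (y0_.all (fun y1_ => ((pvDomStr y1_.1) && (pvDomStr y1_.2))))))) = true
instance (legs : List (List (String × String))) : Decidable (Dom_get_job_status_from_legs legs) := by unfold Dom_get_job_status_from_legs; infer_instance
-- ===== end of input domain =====

-- B replaces A's three filtering passes with one fold maintaining three boolean flags; objective: simpler.

-- leg.get('status'): first-match lookup in the association list (Python dict get)
def legStatus (leg : List (String × String)) : Option String :=
  (leg.find? (fun p => p.1 == "status")).map (·.2)

-- ===== PORT A =====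
def get_job_status_from_legs (legs : List (List (String × String))) : String :=
  if legs = [] then "Draft"
  else
    let started_legs := legs.filter (fun leg => legStatus leg == some "Started")
    if started_legs ≠ [] then "In Progress"
    else
      let completed_legs := legs.filter (fun leg => legStatus leg == some "Completed")
      if completed_legs.length = legs.length then "Completed"
      else
        let planned_legs := legs.filter (fun leg => legStatus leg == some "Planned")
        if planned_legs ≠ [] then "Planned"
        else "Draft"

-- ===== PORT B =====
def get_job_status_from_legs_alt (legs : List (List (String × String))) : String :=
  if legs = [] then "Draft"
  else
    let flags := legs.foldl
      (fun (acc : Bool × Bool × Bool) leg =>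
        let s := legStatus leg
        (acc.1 || s == some "Started", acc.2.1 && s == some "Completed", acc.2.2 || s == some "Planned"))
      (false, true, false)
    if flags.1 then "In Progress"
    else if flags.2.1 then "Completed"
    else if flags.2.2 then "Planned"
    else "Draft"

-- ===== PRECONDITION & SPEC =====
def Spec_get_job_status_from_legs (legs : List (List (String × String))) (out : String) : Prop := out = get_job_status_from_legs_alt legs
instance (legs : List (List (String × String))) (out : String) : Decidable (Spec_get_job_status_from_legs legs out) := by unfold Spec_get_job_status_from_legs; infer_instance

-- ===== CLAIM (what is proved, stated in full; the proofs are below) =====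
def Claim_equal_get_job_status_from_legs : Prop := ∀ (legs : List (List (String × String))), Dom_get_job_status_from_legs legs → Spec_get_job_status_from_legs legs (get_job_status_from_legs legs)

-- ===== LEMMAS AND PROOFS =====

-- the fold computes (any started, all completed, any planned)
theorem fold_flags (legs : List (List (String × String))) (a b c : Bool) :
    legs.foldl
      (fun (acc : Bool × Bool × Bool) leg =>
        let s := legStatus leg
        (acc.1 || s == some "Started", acc.2.1 && s == some "Completed", acc.2.2 || s == some "Planned"))
      (a, b, c)
    = (a || legs.any (fun l => legStatus l == some "Started"),
       b && legs.all (fun l => legStatus l == some "Completed"),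
       c || legs.any (fun l => legStatus l == some "Planned")) := by
  induction legs generalizing a b c with
  | nil => simp
  | cons h t ih =>
    simp only [List.foldl_cons, List.any_cons, List.all_cons, ih]
    simp [Bool.or_assoc, Bool.and_assoc]

-- ===== VERDICT (by name: the statement is the Claim_ definition above) =====
theorem get_job_status_from_legs_spec : Claim_equal_get_job_status_from_legs := by
  intro legs _
  unfold Spec_get_job_status_from_legs get_job_status_from_legs get_job_status_from_legs_alt
  by_cases hnil : legs = []
  · simp [hnil]
  · simp only [hnil, if_false, fold_flags, Bool.false_or, Bool.true_and]
    by_cases hs : legs.any (fun l => legStatus l == some "Started") = true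
    · have hne : legs.filter (fun leg => legStatus leg == some "Started") ≠ [] := by
        simp only [ne_eq, List.filter_eq_nil_iff]
        push Not
        simpa [List.any_eq_true] using hs
      simp [hs, hne]
    · have he : legs.filter (fun leg => legStatus leg == some "Started") = [] := by
        simp only [List.filter_eq_nil_iff]
        intro a ha
        exact fun hc => hs (List.any_eq_true.mpr ⟨a, ha, hc⟩)
      by_cases hc : legs.all (fun l => legStatus l == some "Completed") = true
      · have hlen : (legs.filter (fun leg => legStatus leg == some "Completed")).length = legs.length :=
          List.length_filter_eq_length_iff.mpr (by simpa [List.all_eq_true] using hc)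
        simp [hs, hc, he, hlen]
      · have hlen : (legs.filter (fun leg => legStatus leg == some "Completed")).length ≠ legs.length := by
          intro h
          exact hc (by simpa [List.all_eq_true] using List.length_filter_eq_length_iff.mp h)
        by_cases hp : legs.any (fun l => legStatus l == some "Planned") = true
        · have hpne : legs.filter (fun leg => legStatus leg == some "Planned") ≠ [] := by
            simp only [ne_eq, List.filter_eq_nil_iff]
            push Not
            simpa [List.any_eq_true] using hp
          simp [hs, hc, hp, he, hlen, hpne]
        · have hpe : legs.filter (fun leg => legStatus leg == some "Planned") = [] := by
            simp only [List.filter_eq_nil_iff]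
            intro a ha
            exact fun hcc => hp (List.any_eq_true.mpr ⟨a, ha, hcc⟩)
          simp [hs, hc, hp, he, hlen, hpe]
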